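-- pv_equiv track=rewrite | github.com/JyothiTom/Datastructures-and-Algorithms-using-Python | python_spearman_rank_correlation.py | generate_ranks
-- ===== SOURCE A (Python) =====
-- def generate_ranks(input_array):
-- 	sorted_array = input_array.copy()
-- 	sorted_array.sort()
-- 	ranks = {}
-- 	counter = 0
-- 	duplicate_flag = False
-- 	for index_val in range(len(input_array)):
-- 		if sorted_array[index_val] not in ranks.keys():
-- 			counter += 1
-- 			ranks[sorted_array[index_val]] = counter
-- 		else:
-- 			duplicate_flag = True
-- 	rank = [ranks[i] for i in input_array]
-- 	return rank, duplicate_flag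
-- ===== SOURCE B (Python) =====
-- def generate_ranks(input_array):
--     distinct = set(input_array)
--     rank = [1 + sum(1 for v in distinct if v < x) for x in input_array]
--     return rank, len(distinct) < len(input_array)
-- ===== Notes on version B (the rewrite author's own statement) =====
-- stated objective: alternative
-- what changed: B never sorts: it computes each element's rank by counting the distinct values strictly smaller than it (rank(x) = 1 + |{v in set(xs) : v < x}|), and the duplicate flag by comparing len(set(xs)) with len(xs), replacing A's sort-copy, rank dictionary, running counter and in-loop flag.
import Mathlib
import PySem

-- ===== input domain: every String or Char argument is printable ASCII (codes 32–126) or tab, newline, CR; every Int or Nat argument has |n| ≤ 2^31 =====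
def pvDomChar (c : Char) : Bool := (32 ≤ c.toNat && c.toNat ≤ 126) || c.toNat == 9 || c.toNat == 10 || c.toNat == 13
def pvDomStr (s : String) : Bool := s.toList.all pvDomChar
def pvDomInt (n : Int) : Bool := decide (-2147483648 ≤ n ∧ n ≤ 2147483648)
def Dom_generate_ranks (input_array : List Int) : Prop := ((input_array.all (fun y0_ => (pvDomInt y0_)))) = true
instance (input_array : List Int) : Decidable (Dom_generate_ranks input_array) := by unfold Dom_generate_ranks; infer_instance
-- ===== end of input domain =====

-- B never sorts: each rank is 1 + the count of distinct values strictly below the element, and the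
-- duplicate flag compares len(set(xs)) with len(xs); a different algorithm of similar cost (objective: alternative).

-- ===== PORT A =====
-- ranks[i] in the final comprehension always finds its key (every element of input_array is in
-- sorted_array), so the total getD with default 0 is exact here.
-- state st = (ranks, counter, duplicate_flag)
def generate_ranks (input_array : List Int) : List Int × Bool :=
  let sorted_array := PySem.List.sorted input_array (fun x => x)
  let st := (PySem.List.pyRange 0 (input_array.length : Int) 1).foldl
    (fun (st : PySem.Dict Int Int × Int × Bool) index_val =>
      if st.1.contains (PySem.List.pyGetD sorted_array index_val 0) = false then
        (st.1.insert (PySem.List.pyGetD sorted_array index_val 0) (st.2.1 + 1), st.2.1 + 1, st.2.2)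
      else
        (st.1, st.2.1, true))
    (PySem.Dict.empty, 0, false)
  (input_array.map (fun i => st.1.getD i 0), st.2.2)

-- ===== PORT B =====
-- sum(1 for v in distinct if v < x) is ported as the library count List.countP (PySem: a 0/1-sum IS countP).
def generate_ranks_alt (input_array : List Int) : List Int × Bool :=
  let distinct := PySem.Set.ofList input_array
  (input_array.map (fun x => 1 + (distinct.countP (fun v => decide (v < x)) : Int)),
   decide (distinct.length < input_array.length))

-- ===== PRECONDITION & SPEC =====
def Spec_generate_ranks (input_array : List Int) (out : List Int × Bool) : Prop := out = generate_ranks_alt input_array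
instance (input_array : List Int) (out : List Int × Bool) : Decidable (Spec_generate_ranks input_array out) := by unfold Spec_generate_ranks; infer_instance

-- ===== CLAIM (what is proved, stated in full; the proofs are below) =====
def Claim_equal_generate_ranks : Prop := ∀ (input_array : List Int), Dom_generate_ranks input_array → Spec_generate_ranks input_array (generate_ranks input_array)

-- ===== LEMMAS AND PROOFS =====

-- The rank dictionary A's loop builds over a distinct list u.
def rankDict (u : List Int) : PySem.Dict Int Int :=
  PySem.Dict.ofList ((PySem.List.enumerate u).map (fun p => (p.2, p.1 + 1)))

theorem enumerate_append_singleton (u : List Int) (v : Int) (s : Int) :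
    PySem.List.enumerate (u ++ [v]) s = PySem.List.enumerate u s ++ [((s + u.length : Int), v)] := by
  induction u generalizing s with
  | nil => simp [PySem.List.enumerate_nil, PySem.List.enumerate_cons]
  | cons x u ih => simp [PySem.List.enumerate_cons, ih]; ring_nf

theorem rankDict_keys (u : List Int) (hu : u.Nodup) : (rankDict u).keys = u := by
  have h := PySem.Dict.keys_foldl_insert_key ((PySem.List.enumerate u).map (fun p => (p.2, p.1 + 1)))
    (fun p => p.1) (fun _ p => p.2) PySem.Dict.empty
  simp only [rankDict, PySem.Dict.ofList, PySem.Dict.update]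
  have : (List.foldl (fun acc p => acc.insert p.1 p.2) PySem.Dict.empty
      ((PySem.List.enumerate u).map (fun p => (p.2, p.1 + 1)))).keys
      = PySem.Set.update PySem.Dict.empty.keys
        (((PySem.List.enumerate u).map (fun p => (p.2, p.1 + 1))).map (fun p => p.1)) := h
  rw [this]
  simp only [List.map_map, Function.comp_def]
  have hm : ((PySem.List.enumerate u).map (fun p => p.2)) = u := PySem.List.map_snd_enumerate u 0
  simp only [hm, PySem.Dict.keys_empty]
  show PySem.Set.ofList u = u
  exact PySem.Set.ofList_eq_self_of_nodup u hu

theorem rankDict_append (u : List Int) (v : Int) (_hv : v ∉ u) :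
    rankDict (u ++ [v]) = (rankDict u).insert v ((u.length : Int) + 1) := by
  simp only [rankDict, enumerate_append_singleton u v 0, List.map_append, List.map_cons,
    List.map_nil, PySem.Dict.ofList, PySem.Dict.update, List.foldl_append, List.foldl_cons,
    List.foldl_nil, zero_add]

theorem rankDict_contains (u : List Int) (hu : u.Nodup) (v : Int) :
    (rankDict u).contains v = decide (v ∈ u) := by
  rw [PySem.Dict.contains_eq_decide_mem_keys, rankDict_keys u hu]

theorem set_update_length_le (u l : List Int) :
    (PySem.Set.update u l).length ≤ u.length + l.length := by
  induction l generalizing u with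
  | nil => simp [PySem.Set.update]
  | cons x l ih =>
    simp only [PySem.Set.update, List.foldl_cons] at *
    calc (List.foldl PySem.Set.add (PySem.Set.add u x) l).length
        ≤ (PySem.Set.add u x).length + l.length := ih _
      _ ≤ u.length + (x :: l).length := by
          by_cases h : x ∈ u
          · simp [PySem.Set.add_of_mem h]
          · simp [PySem.Set.add_of_not_mem h]; omega

theorem set_update_sublist (u l : List Int) :
    (PySem.Set.update u l).Sublist (u ++ l) := by
  induction l generalizing u with
  | nil => simp [PySem.Set.update]
  | cons x l ih =>
    simp only [PySem.Set.update, List.foldl_cons] at *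
    refine (ih (PySem.Set.add u x)).trans ?_
    by_cases h : x ∈ u
    · rw [PySem.Set.add_of_mem h]
      exact List.Sublist.append_left (List.sublist_cons_self x l) u
    · rw [PySem.Set.add_of_not_mem h, List.append_assoc]
      simp

-- A's loop over the remaining list l, started in the state reached after building distinct set u.
theorem loopA (l : List Int) (u : List Int) (hu : u.Nodup) (f : Bool) :
    l.foldl
      (fun (st : PySem.Dict Int Int × Int × Bool) v =>
        if st.1.contains v = false then
          (st.1.insert v (st.2.1 + 1), st.2.1 + 1, st.2.2)
        else (st.1, st.2.1, true))
      (rankDict u, (u.length : Int), f)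
    = (rankDict (PySem.Set.update u l), ((PySem.Set.update u l).length : Int),
       f || decide ((PySem.Set.update u l).length < u.length + l.length)) := by
  induction l generalizing u f with
  | nil => simp [PySem.Set.update]
  | cons v l ih =>
    rw [List.foldl_cons]
    simp only [rankDict_contains u hu v]
    by_cases h : v ∈ u
    · rw [if_neg (by simp [h])]
      have hupd : PySem.Set.update u (v :: l) = PySem.Set.update u l := by
        simp [PySem.Set.update, PySem.Set.add_of_mem h]
      rw [ih u hu true, hupd]
      have hle : (PySem.Set.update u l).length ≤ u.length + l.length := set_update_length_le u l
      have hd : decide ((PySem.Set.update u l).length < u.length + (v :: l).length) = true := by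
        simp only [List.length_cons]; exact decide_eq_true (by omega)
      rw [hd]
      simp
    · rw [if_pos (by simp [h])]
      have hnd : (u ++ [v]).Nodup := by
        refine List.Nodup.append hu (List.nodup_singleton v) ?_
        intro a ha hav
        rw [List.mem_singleton] at hav
        exact h (hav ▸ ha)
      have hupd : PySem.Set.update u (v :: l) = PySem.Set.update (u ++ [v]) l := by
        simp [PySem.Set.update, PySem.Set.add_of_not_mem h]
      have e1 : (rankDict u).insert v ((u.length : Int) + 1) = rankDict (u ++ [v]) :=
        (rankDict_append u v h).symm
      have e2 : ((u.length : Int) + 1) = ((u ++ [v]).length : Int) := by simp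
      have e3 : u.length + (v :: l).length = (u ++ [v]).length + l.length := by
        simp only [List.length_cons, List.length_append, List.length_nil]; omega
      rw [e1, e2, ih (u ++ [v]) hnd f, hupd, e3]

-- sorted(set(xs)) = set(sorted(xs)): the first-occurrence dedup of the sorted list IS the sorted distinct list.
theorem ofList_sorted_eq (xs : List Int) :
    PySem.List.sorted (PySem.Set.ofList xs) (fun x => x)
      = PySem.Set.ofList (PySem.List.sorted xs (fun x => x)) := by
  set s := PySem.List.sorted xs (fun x => x) with hs
  have hsub : (PySem.Set.ofList s).Sublist s := by
    have := set_update_sublist [] s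
    simpa [PySem.Set.update, PySem.Set.ofList_eq_foldl] using this
  have hle : s.Pairwise (fun a b => a ≤ b) := by
    simpa using PySem.List.sorted_pairwise xs (fun x => x)
  have hnd : (PySem.Set.ofList s).Nodup := PySem.Set.nodup_ofList s
  have hlt : (PySem.Set.ofList s).Pairwise (fun a b => a < b) := by
    have h1 : (PySem.Set.ofList s).Pairwise (fun a b => a ≤ b) := hle.sublist hsub
    have h2 : (PySem.Set.ofList s).Pairwise (fun a b => a ≠ b) := hnd
    exact (h1.and h2).imp (fun ⟨hle', hne⟩ => lt_of_le_of_ne hle' hne)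
  apply PySem.List.sorted_eq_of_perm_of_pairwise_lt
  · apply (List.perm_ext_iff_of_nodup hnd (PySem.Set.nodup_ofList xs)).2
    intro x
    rw [PySem.Set.mem_ofList, PySem.Set.mem_ofList, hs, PySem.List.mem_sorted]
  · exact hlt

-- In a strictly increasing distinct list, a member's stored rank is 1 + the count of smaller members.
theorem getD_rankDict (u : List Int) (hu : u.Pairwise (fun a b => a < b)) (x : Int) (hx : x ∈ u) :
    (rankDict u).getD x 0 = 1 + (u.countP (fun v => decide (v < x)) : Int) := by
  induction u using List.reverseRecOn with
  | nil => cases hx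
  | append_singleton w v ih =>
    have hw : w.Pairwise (fun a b => a < b) := (List.pairwise_append.1 hu).1
    have hall : ∀ a ∈ w, a < v := by
      intro a ha
      exact (List.pairwise_append.1 hu).2.2 a ha v (List.mem_singleton_self v)
    have hvnot : v ∉ w := fun hmem => lt_irrefl v (hall v hmem)
    rw [rankDict_append w v hvnot, PySem.Dict.getD_insert]
    by_cases hxv : x = v
    · subst hxv
      rw [if_pos rfl]
      have hcount : w.countP (fun v => decide (v < x)) = w.length :=
        List.countP_eq_length.2 (fun a ha => decide_eq_true (hall a ha))
      rw [List.countP_append, hcount]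
      simp
      omega
    · rw [if_neg hxv]
      have hxw : x ∈ w := by
        rcases List.mem_append.1 hx with h | h
        · exact h
        · exact absurd (List.mem_singleton.1 h) hxv
      have hxlt : x < v := hall x hxw
      rw [ih hw hxw, List.countP_append]
      have : [v].countP (fun a => decide (a < x)) = 0 := by
        simp [List.countP_cons]
        omega
      rw [this]
      simp

-- ===== VERDICT (by name: the statement is the Claim_ definition above) =====
theorem generate_ranks_spec : Claim_equal_generate_ranks := by
  intro input_array _
  unfold Spec_generate_ranks generate_ranks generate_ranks_alt
  set s := PySem.List.sorted input_array (fun x => x) with hs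
  have hlen : input_array.length = s.length := (PySem.List.length_sorted ..).symm
  have hrange : (PySem.List.pyRange 0 (input_array.length : Int) 1).foldl
      (fun (st : PySem.Dict Int Int × Int × Bool) index_val =>
        if st.1.contains (PySem.List.pyGetD s index_val 0) = false then
          (st.1.insert (PySem.List.pyGetD s index_val 0) (st.2.1 + 1), st.2.1 + 1, st.2.2)
        else (st.1, st.2.1, true))
      (PySem.Dict.empty, 0, false)
      = s.foldl
        (fun (st : PySem.Dict Int Int × Int × Bool) v =>
          if st.1.contains v = false then (st.1.insert v (st.2.1 + 1), st.2.1 + 1, st.2.2)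
          else (st.1, st.2.1, true))
        (PySem.Dict.empty, 0, false) := by
    rw [hlen]
    exact PySem.List.foldl_pyRange_zero_pyGetD' s 0
      (fun (st : PySem.Dict Int Int × Int × Bool) v =>
        if st.1.contains v = false then (st.1.insert v (st.2.1 + 1), st.2.1 + 1, st.2.2)
        else (st.1, st.2.1, true)) (PySem.Dict.empty, 0, false)
  have hinit : ((PySem.Dict.empty : PySem.Dict Int Int), (0 : Int), false)
      = (rankDict [], ((([] : List Int).length : Nat) : Int), false) := by
    simp [rankDict, PySem.List.enumerate_nil, PySem.Dict.ofList, PySem.Dict.update]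
  have hfold : s.foldl
      (fun (st : PySem.Dict Int Int × Int × Bool) v =>
        if st.1.contains v = false then (st.1.insert v (st.2.1 + 1), st.2.1 + 1, st.2.2)
        else (st.1, st.2.1, true))
      (PySem.Dict.empty, 0, false)
      = (rankDict (PySem.Set.update [] s), ((PySem.Set.update [] s).length : Int),
         false || decide ((PySem.Set.update [] s).length < ([] : List Int).length + s.length)) := by
    rw [hinit]
    exact loopA s [] List.nodup_nil false
  have hof : PySem.Set.update ([] : List Int) s = PySem.Set.ofList s := by
    rw [PySem.Set.ofList_eq_foldl]; rfl
  -- set(sorted xs) is a permutation of set(xs): same members, both Nodup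
  have hperm : (PySem.Set.ofList s).Perm (PySem.Set.ofList input_array) := by
    apply (List.perm_ext_iff_of_nodup (PySem.Set.nodup_ofList s) (PySem.Set.nodup_ofList input_array)).2
    intro x
    rw [PySem.Set.mem_ofList, PySem.Set.mem_ofList, hs, PySem.List.mem_sorted]
  have hlt : (PySem.Set.ofList s).Pairwise (fun a b => a < b) := by
    have := PySem.List.sorted_ofList_pairwise_lt (xs := input_array)
    rw [ofList_sorted_eq input_array] at this
    exact this
  simp only [hrange, hfold, hof]
  refine Prod.ext ?_ ?_
  · show List.map _ input_array = List.map _ input_array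
    apply List.map_congr_left
    intro x hx
    have hxs : x ∈ PySem.Set.ofList s := by
      rw [PySem.Set.mem_ofList, hs, PySem.List.mem_sorted]; exact hx
    rw [getD_rankDict (PySem.Set.ofList s) hlt x hxs, hperm.countP_eq]
  · show (false || decide _) = decide _
    rw [Bool.false_or, hperm.length_eq, hlen]
    simp
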